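-- pv_equiv track=rewrite | github.com/asifhussain60/CORTEX | .temp-publish/scripts/fix_documentation_quality.py | fix_empty_sections
-- ===== SOURCE A (Python) =====
-- from typing import List, Tuple
--
-- def fix_empty_sections(content: str, filename: str) -> Tuple[str, int]:
--     """Fix empty sections by adding brief content"""
--     changes = 0
--
--     # Pattern: ## Header\n\n## (empty section)
--     # Find all section headers
--     lines = content.split('\n')
--     result = []
--     i = 0
--
--     while i < len(lines):
--         line = lines[i]
--         result.append(line)
--
--         # Check if this is a section header
--         if line.startswith('##') and not line.startswith('###'):
--             # Check if next non-empty line is also a section header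
--             j = i + 1
--             while j < len(lines) and not lines[j].strip():
--                 j += 1
--
--             if j < len(lines) and lines[j].startswith('##'):
--                 # Empty section detected
--                 changes += 1
--                 # Add brief content based on context
--                 section_title = line.replace('##', '').strip()
--                 filler = f"\nThis section provides information about {section_title.lower()}. See related documentation in the navigation menu for detailed guides.\n"
--                 result.append(filler)
--
--         i += 1
--
--     return '\n'.join(result), changes
-- ===== SOURCE B (Python) =====
-- def _filler(line):
--     title = line.replace('##', '').strip().lower()
--     return ("\nThis section provides information about "
--             + title
--             + ". See related documentation in the navigation menu for detailed guides.\n")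
--
--
-- def fix_empty_sections(content: str, filename: str):
--     lines = content.split('\n')
--     n = len(lines)
--     # nxt[i] = first line at index >= i that is non-blank, else None (one backward pass)
--     nxt = [None] * (n + 1)
--     for i in range(n - 1, -1, -1):
--         nxt[i] = lines[i] if lines[i].strip() else nxt[i + 1]
--     out = []
--     changes = 0
--     for i, line in enumerate(lines):
--         out.append(line)
--         if line.startswith('##') and not line.startswith('###'):
--             nb = nxt[i + 1]
--             if nb is not None and nb.startswith('##'):
--                 changes += 1
--                 out.append(_filler(line))
--     return '\n'.join(out), changes
-- ===== Notes on version B (the rewrite author's own statement) =====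
-- stated objective: alternative
-- what changed: Replaces A's nested forward blank-skipping scan inside the line loop by a single backward pass that precomputes, for every index, the next non-blank line, then one forward pass emits lines and fillers.
import Mathlib
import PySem

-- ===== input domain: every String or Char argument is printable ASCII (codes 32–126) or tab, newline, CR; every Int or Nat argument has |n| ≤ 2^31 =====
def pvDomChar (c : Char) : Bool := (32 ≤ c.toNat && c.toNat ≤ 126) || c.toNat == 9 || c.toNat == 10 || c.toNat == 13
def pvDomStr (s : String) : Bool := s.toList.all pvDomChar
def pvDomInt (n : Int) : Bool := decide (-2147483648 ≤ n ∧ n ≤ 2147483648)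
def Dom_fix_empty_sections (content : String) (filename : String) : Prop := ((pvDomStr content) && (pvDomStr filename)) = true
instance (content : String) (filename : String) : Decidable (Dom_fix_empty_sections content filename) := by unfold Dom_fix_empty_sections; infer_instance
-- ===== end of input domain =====

-- B replaces A's inner blank-skipping scan by a precomputed backward next-non-blank pass (objective: alternative decomposition; same return value).

-- ===== PORT A =====
-- filler f-string, ported as ''.join of the three pieces
def pvFillerA (line : String) : String :=
  PySem.Str.join "" ["\nThis section provides information about ",
    PySem.Str.lower (PySem.Str.strip (PySem.Str.replace line "##" "")),
    ". See related documentation in the navigation menu for detailed guides.\n"]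

-- inner 'while j < len(lines) and not lines[j].strip(): j += 1'
def pvSkipBlank (lines : List String) (j : Nat) : Nat :=
  if h : j < lines.length then
    if PySem.Str.strip lines[j] = "" then pvSkipBlank lines (j + 1) else j
  else j
termination_by lines.length - j

-- the outer 'while i < len(lines)' loop, state (result, changes)
def pvLoopA (lines : List String) (i : Nat) (result : List String) (changes : Int) :
    List String × Int :=
  if h : i < lines.length then
    let line := lines[i]
    let result := result ++ [line]
    if PySem.Str.startswith line "##" && !PySem.Str.startswith line "###" then
      let j := pvSkipBlank lines (i + 1)
      if hj : j < lines.length then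
        if PySem.Str.startswith lines[j] "##" then
          pvLoopA lines (i + 1) (result ++ [pvFillerA line]) (changes + 1)
        else pvLoopA lines (i + 1) result changes
      else pvLoopA lines (i + 1) result changes
    else pvLoopA lines (i + 1) result changes
  else (result, changes)
termination_by lines.length - i

def fix_empty_sections (content : String) (filename : String) : String × Int :=
  let lines := (PySem.Chars.splitOn content.toList "\n".toList).map String.ofList
  let r := pvLoopA lines 0 [] 0
  (PySem.Str.join "\n" r.1, r.2)

-- ===== PORT B =====
def pvFillerB (line : String) : String :=
  PySem.Str.join "" ["\nThis section provides information about ",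
    PySem.Str.lower (PySem.Str.strip (PySem.Str.replace line "##" "")),
    ". See related documentation in the navigation menu for detailed guides.\n"]

-- backward pass: nxt[i] = first non-blank line at index >= i, else none (length n+1)
def pvNxt (lines : List String) : List (Option String) :=
  lines.foldr
    (fun line acc =>
      (if PySem.Str.strip line = "" then acc.headD none else some line) :: acc)
    [none]

-- one step of the forward pass over enumerate(lines)
def pvStepB (nxt : List (Option String)) (st : List String × Int) (p : Int × String) :
    List String × Int :=
  let out := st.1 ++ [p.2]
  if PySem.Str.startswith p.2 "##" && !PySem.Str.startswith p.2 "###" then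
    match PySem.List.pyGetD nxt (p.1 + 1) none with
    | some nb => if PySem.Str.startswith nb "##" then (out ++ [pvFillerB p.2], st.2 + 1)
                 else (out, st.2)
    | none => (out, st.2)
  else (out, st.2)

def fix_empty_sections_alt (content : String) (filename : String) : String × Int :=
  let lines := (PySem.Chars.splitOn content.toList "\n".toList).map String.ofList
  let nxt := pvNxt lines
  let r := (PySem.List.enumerate lines 0).foldl (pvStepB nxt) ([], 0)
  (PySem.Str.join "\n" r.1, r.2)

-- ===== PRECONDITION & SPEC =====
def Spec_fix_empty_sections (content : String) (filename : String) (out : String × Int) : Prop := out = fix_empty_sections_alt content filename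
instance (content : String) (filename : String) (out : String × Int) : Decidable (Spec_fix_empty_sections content filename out) := by unfold Spec_fix_empty_sections; infer_instance

-- ===== CLAIM (what is proved, stated in full; the proofs are below) =====
def Claim_equal_fix_empty_sections : Prop := ∀ (content : String) (filename : String), Dom_fix_empty_sections content filename → Spec_fix_empty_sections content filename (fix_empty_sections content filename)

-- ===== LEMMAS AND PROOFS =====

theorem pvSkipBlank_cons (l : String) (ls : List String) (j : Nat) :
    pvSkipBlank (l :: ls) (j + 1) = pvSkipBlank ls j + 1 := by
  fun_induction pvSkipBlank ls j with
  | case1 j h hblank ih =>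
    rw [pvSkipBlank]
    simp only [List.length_cons, Nat.add_lt_add_iff_right, h, dite_true]
    have : (l :: ls)[j + 1]'(by simpa using Nat.succ_lt_succ h) = ls[j] := by simp
    rw [this, if_pos hblank, ih]
  | case2 j h hblank =>
    rw [pvSkipBlank]
    simp only [List.length_cons, Nat.add_lt_add_iff_right, h, dite_true]
    have : (l :: ls)[j + 1]'(by simpa using Nat.succ_lt_succ h) = ls[j] := by simp
    rw [this, if_neg hblank]
  | case3 j h =>
    rw [pvSkipBlank]
    simp only [List.length_cons]
    rw [dif_neg (by omega)]

theorem pvNxt_getD (lines : List String) (j : Nat) :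
    (pvNxt lines).getD j none =
      if h : pvSkipBlank lines j < lines.length then some lines[pvSkipBlank lines j]
      else none := by
  induction lines generalizing j with
  | nil =>
    rw [pvSkipBlank]
    simp [pvNxt]
  | cons l ls ih =>
    have hcons : pvNxt (l :: ls) =
        (if PySem.Str.strip l = "" then (pvNxt ls).headD none else some l) :: pvNxt ls := rfl
    have hshift : ∀ (k : Nat),
        (if h : pvSkipBlank ls k < ls.length then some ls[pvSkipBlank ls k] else none) =
        (if h : pvSkipBlank (l :: ls) (k + 1) < (l :: ls).length then
          some ((l :: ls)[pvSkipBlank (l :: ls) (k + 1)]'h) else none) := by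
      intro k
      by_cases h : pvSkipBlank ls k < ls.length
      · rw [dif_pos h, dif_pos (by rw [pvSkipBlank_cons]; simpa using Nat.succ_lt_succ h)]
        simp [pvSkipBlank_cons]
      · rw [dif_neg h, dif_neg (by rw [pvSkipBlank_cons]; simp; omega)]
    cases j with
    | zero =>
      rw [pvSkipBlank, hcons]
      by_cases hb : PySem.Str.strip l = ""
      · have hhd : (pvNxt ls).headD none = (pvNxt ls).getD 0 none := by
          cases pvNxt ls <;> rfl
        simp only [List.length_cons, Nat.zero_lt_succ, dite_true, List.getElem_cons_zero,
          List.getD_cons_zero, if_pos hb]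
        rw [hhd, ih 0]
        simpa using hshift 0
      · simp only [List.length_cons, Nat.zero_lt_succ, dite_true, List.getElem_cons_zero,
          List.getD_cons_zero, if_neg hb]
    | succ k =>
      rw [hcons]
      simp only [List.getD_cons_succ]
      rw [ih k, hshift k]

theorem pvLoopA_eq (lines : List String) (i : Nat) (res : List String) (ch : Int) :
    pvLoopA lines i res ch =
      (PySem.List.enumerate (lines.drop i) (i : Int)).foldl (pvStepB (pvNxt lines)) (res, ch) := by
  have hstep : ∀ (i : Nat) (h : i < lines.length) (res : List String) (ch : Int),
      pvStepB (pvNxt lines) (res, ch) ((i : Int), lines[i]) =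
        if PySem.Str.startswith lines[i] "##" && !PySem.Str.startswith lines[i] "###" then
          (if hj : pvSkipBlank lines (i + 1) < lines.length then
            (if PySem.Str.startswith (lines[pvSkipBlank lines (i + 1)]'hj) "##" then
              (res ++ [lines[i]] ++ [pvFillerB lines[i]], ch + 1)
            else (res ++ [lines[i]], ch))
          else (res ++ [lines[i]], ch))
        else (res ++ [lines[i]], ch) := by
    intro i h res ch
    unfold pvStepB
    have hcast : (i : Int) + 1 = ((i + 1 : Nat) : Int) := by push_cast; ring
    rw [hcast, PySem.List.pyGetD_natCast, pvNxt_getD]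
    by_cases hj : pvSkipBlank lines (i + 1) < lines.length
    · rw [dif_pos hj]
      simp [hj]
    · rw [dif_neg hj]
      simp [hj]
  fun_induction pvLoopA lines i res ch with
  | case1 i res ch h line result1 hc jv hj hs ih =>
    rw [List.drop_eq_getElem_cons h, PySem.List.enumerate_cons, List.foldl_cons, hstep i h,
      if_pos hc, dif_pos hj, if_pos hs, ih]
    have : pvFillerA lines[i] = pvFillerB lines[i] := rfl
    rw [this]
    push_cast; ring_nf; rfl
  | case2 i res ch h line result1 hc jv hj hs ih =>
    rw [List.drop_eq_getElem_cons h, PySem.List.enumerate_cons, List.foldl_cons, hstep i h,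
      if_pos hc, dif_pos hj, if_neg hs, ih]
    push_cast; ring_nf; rfl
  | case3 i res ch h line result1 hc jv hj ih =>
    rw [List.drop_eq_getElem_cons h, PySem.List.enumerate_cons, List.foldl_cons, hstep i h,
      if_pos hc, dif_neg hj, ih]
    push_cast; ring_nf; rfl
  | case4 i res ch h line result1 hc ih =>
    rw [List.drop_eq_getElem_cons h, PySem.List.enumerate_cons, List.foldl_cons, hstep i h,
      if_neg hc, ih]
    push_cast; ring_nf; rfl
  | case5 i res ch h =>
    rw [List.drop_eq_nil_of_le (by omega), PySem.List.enumerate_nil, List.foldl_nil]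

-- ===== VERDICT (by name: the statement is the Claim_ definition above) =====
theorem fix_empty_sections_spec : Claim_equal_fix_empty_sections := by
  intro content filename _
  simp only [Spec_fix_empty_sections, fix_empty_sections, fix_empty_sections_alt,
    pvLoopA_eq, List.drop_zero, Nat.cast_zero]
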